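-- pv_equiv track=rewrite | github.com/JonathanGun/IF4020-Kriptografi-Classic-Cipher | raw_code/vigenere_def.py | vigenere_key
-- ===== SOURCE A (Python) =====
-- def vigenere_key(string, key):
-- 	key = list(key)
-- 	if len(string) == len(key):
-- 		return key
-- 	else:
-- 		for i in range(len(string) - len(key)):
-- 			key.append(key[i % len(key)])
-- 	return("".join(key))
-- ===== SOURCE B (Python) =====
-- def vigenere_key(string, key):
--     L = max(len(string), len(key))
--     reps = L // len(key) + 1
--     return (key * reps)[:L]
-- ===== Notes on version B (the rewrite author's own statement) =====
-- stated objective: idiomatic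
-- what changed: Replaces the char-by-char append loop with a closed-form string multiplication and slice: the key repeated ceil-many times and truncated to max(len(string), len(key)).
-- outside the precondition, e.g. on vigenere_key('ab', 'cd'): A returns ['c', 'd'], B returns 'cd'
import Mathlib
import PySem

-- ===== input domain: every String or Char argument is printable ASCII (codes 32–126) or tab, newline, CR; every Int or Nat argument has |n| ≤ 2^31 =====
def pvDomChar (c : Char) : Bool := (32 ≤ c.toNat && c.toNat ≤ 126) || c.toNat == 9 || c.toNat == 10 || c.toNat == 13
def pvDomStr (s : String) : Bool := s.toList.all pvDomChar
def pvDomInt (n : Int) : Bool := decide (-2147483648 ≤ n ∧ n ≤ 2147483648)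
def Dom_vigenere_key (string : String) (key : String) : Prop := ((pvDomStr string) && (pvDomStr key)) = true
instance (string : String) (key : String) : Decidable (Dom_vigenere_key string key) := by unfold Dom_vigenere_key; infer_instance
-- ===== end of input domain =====

-- B replaces A's char-by-char append loop with a closed form (key repeated ⌈⌉-many times, truncated); objective: idiomatic.


-- ===== PORT A =====
-- `key = list(key)`; the loop appends key[i % len(key)] where len(key) is the list's CURRENT length.
def vigenere_key (string : String) (key : String) : String :=
  let ks := key.toList
  if string.toList.length == ks.length then
    String.ofList ks  -- Python A returns the LIST list(key) here, not a str; Pre_ excludes this branch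
  else
    let final := (PySem.List.pyRange 0 ((string.toList.length : Int) - (ks.length : Int)) 1).foldl
      (fun acc i => acc ++ [PySem.List.pyGetD acc (PySem.Int.mod i (acc.length : Int)) ' ']) ks
    String.ofList final  -- "".join of a list of single characters

-- ===== PORT B =====
-- L = max(len(string), len(key)); reps = L // len(key) + 1; return (key * reps)[:L].
-- Nat `/` is exact for Python's `//` on nonnegative operands; Python raises ZeroDivisionError iff key = "" (excluded by Pre_).
-- `key * reps` is List.flatten (List.replicate reps key.toList); the slice [:L] with 0 ≤ L is List.take L.
def vigenere_key_alt (string : String) (key : String) : String :=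
  let L := max string.toList.length key.toList.length
  let reps := L / key.toList.length + 1
  String.ofList ((List.replicate reps key.toList).flatten.take L)

-- ===== PRECONDITION & SPEC =====
-- Pre_ excludes the empty key, on which A raises ZeroDivisionError whenever string ≠ "" (and returns a list when
-- string = ""), and equal-length inputs, on which A returns a Python LIST of characters rather than a str.
def Pre_vigenere_key (string : String) (key : String) : Prop :=
  key.toList ≠ [] ∧ string.toList.length ≠ key.toList.length
instance (string : String) (key : String) : Decidable (Pre_vigenere_key string key) := by
  unfold Pre_vigenere_key; infer_instance
def pvWitness_vigenere_key : String × String := ("abcdefg", "key")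

def Spec_vigenere_key (string : String) (key : String) (out : String) : Prop := out = vigenere_key_alt string key
instance (string : String) (key : String) (out : String) : Decidable (Spec_vigenere_key string key out) := by unfold Spec_vigenere_key; infer_instance

-- ===== CLAIM (what is proved, stated in full; the proofs are below) =====
def Claim_equal_vigenere_key : Prop := ∀ (string : String) (key : String), Dom_vigenere_key string key → Pre_vigenere_key string key → Spec_vigenere_key string key (vigenere_key string key)

-- ===== LEMMAS AND PROOFS =====

-- A's loop, named for the proofs (definitionally the fold in port A)
def loopA (ks : List Char) (k : Nat) : List Char :=
  (PySem.List.pyRange 0 (k : Int) 1).foldl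
    (fun acc i => acc ++ [PySem.List.pyGetD acc (PySem.Int.mod i (acc.length : Int)) ' ']) ks

theorem loopA_zero (ks : List Char) : loopA ks 0 = ks := by
  unfold loopA
  rw [PySem.List.pyRange_one_eq_nil (by simp)]
  rfl

theorem loopA_succ (ks : List Char) (k : Nat) :
    loopA ks (k + 1) = loopA ks k ++
      [PySem.List.pyGetD (loopA ks k) (PySem.Int.mod (k : Int) ((loopA ks k).length : Int)) ' '] := by
  unfold loopA
  rw [show ((k + 1 : Nat) : Int) = (k : Int) + 1 by push_cast; ring,
    PySem.List.pyRange_one_succ_right (by positivity), List.foldl_append]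
  rfl

theorem loopA_length (ks : List Char) (k : Nat) : (loopA ks k).length = ks.length + k := by
  induction k with
  | zero => rw [loopA_zero]; omega
  | succ k ih =>
      rw [loopA_succ, List.length_append, ih, List.length_cons, List.length_nil]
      omega

theorem loopA_getElem? (ks : List Char) (hm : ks ≠ []) (k : Nat) :
    ∀ j, j < ks.length + k → (loopA ks k)[j]? = ks[j % ks.length]? := by
  have hmpos : 0 < ks.length := List.length_pos_of_ne_nil hm
  induction k with
  | zero =>
      intro j hj
      rw [loopA_zero, Nat.mod_eq_of_lt (by omega)]
  | succ k ih =>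
      intro j hj
      have hlen : (loopA ks k).length = ks.length + k := loopA_length ks k
      have hstep : PySem.List.pyGetD (loopA ks k)
            (PySem.Int.mod (k : Int) (((loopA ks k).length : Nat) : Int)) ' '
          = (loopA ks k).getD k ' ' := by
        rw [PySem.Int.mod_natCast k (loopA ks k).length,
          Nat.mod_eq_of_lt (by omega), PySem.List.pyGetD_natCast]
      rw [loopA_succ, hstep]
      by_cases hj' : j < (loopA ks k).length
      · rw [List.getElem?_append_left hj']
        exact ih j (by omega)
      · have hje : j = ks.length + k := by omega
        have hkin : k < (loopA ks k).length := by omega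
        rw [List.getElem?_append_right (by omega)]
        have : j - (loopA ks k).length = 0 := by omega
        rw [this]
        simp only [List.getElem?_cons_zero, List.getD_eq_getElem?_getD,
          List.getElem?_eq_getElem hkin, Option.getD_some]
        rw [← List.getElem?_eq_getElem hkin, ih k (by omega), hje,
          Nat.add_mod_left]

-- element j of `key * R` is key[j % m]
theorem flatten_replicate_getElem? {α : Type} (ks : List α) (hm : ks ≠ []) :
    ∀ (R j : Nat), j < ((List.replicate R ks).flatten).length →
      ((List.replicate R ks).flatten)[j]? = ks[j % ks.length]? := by
  have hmpos : 0 < ks.length := List.length_pos_of_ne_nil hm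
  intro R
  induction R with
  | zero => intro j h; simp at h
  | succ R ih =>
      intro j h
      simp only [List.replicate_succ, List.flatten_cons] at h ⊢
      by_cases hj : j < ks.length
      · rw [List.getElem?_append_left hj, Nat.mod_eq_of_lt hj]
      · have hj' : ks.length ≤ j := Nat.le_of_not_lt hj
        rw [List.getElem?_append_right hj']
        rw [ih (j - ks.length) (by simp only [List.length_append] at h; omega)]
        congr 1
        conv_rhs => rw [← Nat.sub_add_cancel hj']
        rw [Nat.add_mod_right]

-- ===== VERDICT (by name: the statement is the Claim_ definition above) =====
theorem vigenere_key_spec : Claim_equal_vigenere_key := by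
  intro string key _ hpre
  obtain ⟨hm, hne⟩ := hpre
  unfold Spec_vigenere_key vigenere_key vigenere_key_alt
  set ks := key.toList with hks
  set n := string.toList.length with hn
  have hmpos : 0 < ks.length := List.length_pos_of_ne_nil hm
  simp only [beq_iff_eq, if_neg hne]
  by_cases hlt : n < ks.length
  · -- range is empty: A returns the key unchanged; B takes m from key ++ key ++ []
    rw [PySem.List.pyRange_one_eq_nil (by omega)]
    simp only [List.foldl_nil]
    rw [Nat.max_eq_right (Nat.le_of_lt hlt), Nat.div_self hmpos]
    congr 1
    have h2 : (List.replicate 2 ks).flatten = ks ++ ks := by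
      simp [List.replicate_succ]
    rw [h2]
    exact (List.take_left' rfl).symm
  · -- n > m: both sides are elementwise ks[j % m]
    have hgt : ks.length < n := by omega
    have hdiff : (n : Int) - (ks.length : Int) = ((n - ks.length : Nat) : Int) := by omega
    rw [hdiff]
    have hA : (PySem.List.pyRange 0 ((n - ks.length : Nat) : Int) 1).foldl
        (fun acc i => acc ++ [PySem.List.pyGetD acc (PySem.Int.mod i (acc.length : Int)) ' ']) ks
        = loopA ks (n - ks.length) := rfl
    rw [hA, Nat.max_eq_left (Nat.le_of_lt hgt)]
    have hAlen : (loopA ks (n - ks.length)).length = n := by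
      rw [loopA_length]; omega
    have hRlen : ((List.replicate (n / ks.length + 1) ks).flatten).length
        = (n / ks.length + 1) * ks.length := by
      simp [List.length_flatten, Nat.mul_comm]
    have hbig : n < (n / ks.length + 1) * ks.length := by
      have h1 := Nat.div_add_mod n ks.length
      have h2 := Nat.mod_lt n hmpos
      have h3 : (n / ks.length + 1) * ks.length = ks.length * (n / ks.length) + ks.length := by ring
      omega
    congr 1
    apply List.ext_getElem?
    intro j
    by_cases hjn : j < n
    · rw [List.getElem?_take_of_lt hjn,
        loopA_getElem? ks hm (n - ks.length) j (by omega),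
        flatten_replicate_getElem? ks hm _ j (by omega)]
    · rw [List.getElem?_eq_none (by omega),
        List.getElem?_eq_none (by simp only [List.length_take]; omega)]
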